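-- pv_equiv track=rewrite | github.com/freezer333/biotools | analysis/urs_count.py | process_mrna
-- ===== SOURCE A (Python) =====
-- def process_mrna(mrna):
--   count = 0;
--   start = -1;
--   end = -1;
--   if 'u_rich_downstream' in mrna :
--     for u in mrna['u_rich_downstream'] :
--       if start == -1 :
--         start = u['downstream_rel_pos']
--         end = start + 5
--         count+= 1
--       else :
--         if u['downstream_rel_pos'] > end :
--           count += 1
--           start = u['downstream_rel_pos']
--           end = start + 5
--         else :
--           end = u['downstream_rel_pos'] + 5
--
--   return count
-- ===== SOURCE B (Python) =====
-- def process_mrna(mrna):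
--     positions = [u['downstream_rel_pos'] for u in mrna.get('u_rich_downstream', [])]
--     if not positions:
--         return 0
--     return 1 + sum(1 for a, b in zip(positions, positions[1:]) if b - a > 5)
-- ===== Notes on version B (the rewrite author's own statement) =====
-- stated objective: simpler
-- what changed: Replaces the running-interval scan with mutable count/start/end state by a single pairwise expression: 1 plus the number of adjacent position gaps greater than 5.
-- intended difference: On lists whose first matching u_rich_downstream positions contain a -1 that A's start==-1 sentinel mistakes for 'no interval open' (followed by a position <= 4), A over-counts by starting a new group, e.g. positions [-1,3] give A=2; B returns the intended cluster count 1 since -1 is an ordinary position and 3 lies within its 5-wide window. — e.g. on process_mrna([("u_rich_downstream", [[("downstream_rel_pos", -1)], [("downstream_rel_pos", 3)]])]): A returns 2, B returns 1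
import Mathlib
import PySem

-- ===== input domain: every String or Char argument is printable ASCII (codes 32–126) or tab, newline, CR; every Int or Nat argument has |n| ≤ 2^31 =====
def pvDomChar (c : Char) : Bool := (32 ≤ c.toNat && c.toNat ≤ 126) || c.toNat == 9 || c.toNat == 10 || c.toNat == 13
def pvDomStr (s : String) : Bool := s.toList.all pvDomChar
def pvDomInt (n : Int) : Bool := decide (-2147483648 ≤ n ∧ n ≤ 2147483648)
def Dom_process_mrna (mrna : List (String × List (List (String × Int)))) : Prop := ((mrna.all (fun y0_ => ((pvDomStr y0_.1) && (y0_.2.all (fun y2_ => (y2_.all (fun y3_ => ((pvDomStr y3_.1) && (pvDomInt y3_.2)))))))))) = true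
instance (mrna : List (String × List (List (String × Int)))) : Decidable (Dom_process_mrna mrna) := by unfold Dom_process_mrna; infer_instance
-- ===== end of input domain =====

-- B replaces A's running-interval scan (mutable count/start/end) by a simpler pairwise-gap count;
-- on position lists where A's start==-1 sentinel collides with a real position -1, B returns the
-- intended cluster count (see D_ below).

-- ===== PORT A =====
-- u['downstream_rel_pos'] raises KeyError when absent; ported with getD 0, and Pre_ requires the key.
def process_mrna (mrna : List (String × List (List (String × Int)))) : Int :=
  match PySem.Dict.get? (PySem.Dict.mk mrna) "u_rich_downstream" with
  | none => 0
  | some us =>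
    (us.foldl
      (fun (s : Int × Int × Int) u =>
        let pos := PySem.Dict.getD (PySem.Dict.mk u) "downstream_rel_pos" 0
        if s.2.1 == -1 then (s.1 + 1, pos, pos + 5)
        else if pos > s.2.2 then (s.1 + 1, pos, pos + 5)
        else (s.1, s.2.1, pos + 5))
      (0, -1, -1)).1

-- ===== PORT B =====
def process_mrna_alt (mrna : List (String × List (List (String × Int)))) : Int :=
  let positions :=
    ((PySem.Dict.get? (PySem.Dict.mk mrna) "u_rich_downstream").getD []).map
      (fun u => PySem.Dict.getD (PySem.Dict.mk u) "downstream_rel_pos" 0)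
  if positions = [] then 0
  else 1 + (positions.zip (positions.drop 1)).foldl
      (fun (c : Int) ab => if ab.2 - ab.1 > 5 then c + 1 else c) 0

-- ===== PRECONDITION & SPEC =====
-- Pre_ excludes exactly the inputs where both Pythons raise KeyError: an element of the
-- iterated u_rich_downstream list lacking the key 'downstream_rel_pos'.
def Pre_process_mrna (mrna : List (String × List (List (String × Int)))) : Prop :=
  ∀ u ∈ (mrna.lookup "u_rich_downstream").getD [],
    (u.lookup "downstream_rel_pos").isSome = true
instance (mrna : List (String × List (List (String × Int)))) : Decidable (Pre_process_mrna mrna) := by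
  unfold Pre_process_mrna; infer_instance
def pvWitness_process_mrna : (List (String × List (List (String × Int)))) :=
  [("u_rich_downstream", [[("downstream_rel_pos", 3)], [("downstream_rel_pos", 20)]])]

-- On inputs whose position list reaches a state where A's start variable holds a genuine
-- position -1 (so A's 'start == -1' sentinel reads as 'no interval open') followed by a
-- position ≤ 4, A over-counts by opening a spurious new group (e.g. positions [-1,3] → A = 2);
-- B returns the intended cluster count (1 there), since -1 is an ordinary position whose
-- 5-wide window covers the next one.
-- D_ scans the position list (read off the input by first-match lookups) with state
-- (hit, g, prev), where g says "the previous position was freshly counted and is -1";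
-- hit becomes true when a position ≤ 4 is reached in that state.  prev starts at -2^32,
-- below every Dom-admissible position.
def D_process_mrna (mrna : List (String × List (List (String × Int)))) : Prop :=
  ∃ us ∈ mrna.lookup "u_rich_downstream",
    let ps := us.filterMap (List.lookup "downstream_rel_pos")
    ∃ t ∈ List.zip (-7 :: ps) (ps.zip ps.tail), t.1 < -6 ∧ t.2.1 = -1 ∧ t.2.2 ≤ 4
instance (mrna : List (String × List (List (String × Int)))) : Decidable (D_process_mrna mrna) := by
  unfold D_process_mrna; infer_instance

def Spec_process_mrna (mrna : List (String × List (List (String × Int)))) (out : Int) : Prop :=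
  ¬ D_process_mrna mrna → out = process_mrna_alt mrna
instance (mrna : List (String × List (List (String × Int)))) (out : Int) : Decidable (Spec_process_mrna mrna out) := by
  unfold Spec_process_mrna; infer_instance

def pvDiffWitness_process_mrna : (List (String × List (List (String × Int)))) :=
  [("u_rich_downstream", [[("downstream_rel_pos", -1)], [("downstream_rel_pos", 3)]])]
def pvDiffWitnessOut_process_mrna : Int × Int := (2, 1)

-- ===== CLAIM (what is proved, stated in full; the proofs are below) =====
def Claim_unchanged_process_mrna : Prop := ∀ (mrna : List (String × List (List (String × Int)))), Dom_process_mrna mrna → Pre_process_mrna mrna → Spec_process_mrna mrna (process_mrna mrna)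
def Claim_changed_process_mrna : Prop := Dom_process_mrna (pvDiffWitness_process_mrna) ∧ Pre_process_mrna (pvDiffWitness_process_mrna) ∧ D_process_mrna (pvDiffWitness_process_mrna) ∧ process_mrna (pvDiffWitness_process_mrna) = pvDiffWitnessOut_process_mrna.1 ∧ process_mrna_alt (pvDiffWitness_process_mrna) = pvDiffWitnessOut_process_mrna.2 ∧ pvDiffWitnessOut_process_mrna.1 ≠ pvDiffWitnessOut_process_mrna.2
def Claim_exact_process_mrna : Prop := ∀ (mrna : List (String × List (List (String × Int)))), Dom_process_mrna mrna → Pre_process_mrna mrna → D_process_mrna mrna → process_mrna mrna ≠ process_mrna_alt mrna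

-- ===== LEMMAS AND PROOFS =====

-- pvSentinelHit prev g ps: g says "the previous position was freshly counted and is -1";
-- true iff some position is reached in that state while lying within the window (≤ 4)
def pvSentinelHit (prev : Int) (g : Bool) : List Int → Bool
  | [] => false
  | q :: rest =>
      (g && decide (q ≤ 4)) ||
        pvSentinelHit q ((q == -1) && (g || decide (q > prev + 5))) rest

-- the positions both Pythons read, as D_ reads them
def pvURSPositions (mrna : List (String × List (List (String × Int)))) : List Int :=
  ((mrna.lookup "u_rich_downstream").getD []).map
    (fun u => (u.lookup "downstream_rel_pos").getD 0)

def pvHasSentinel : List Int → Bool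
  | [] => false
  | p :: rest => pvSentinelHit p (p == -1) rest

-- A's loop body on a bare position, state = (count, start, end)
def stepA (s : Int × Int × Int) (q : Int) : Int × Int × Int :=
  if s.2.1 == -1 then (s.1 + 1, q, q + 5)
  else if q > s.2.2 then (s.1 + 1, q, q + 5)
  else (s.1, s.2.1, q + 5)

-- B's pairwise count, recursively
def countPairs : Int → List Int → Int
  | _, [] => 0
  | prev, q :: rest => (if q - prev > 5 then 1 else 0) + countPairs q rest

def pvACount : List Int → Int
  | [] => 0
  | p :: rest => (rest.foldl stepA (1, p, p + 5)).1

def pvBCount : List Int → Int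
  | [] => 0
  | p :: rest => 1 + countPairs p rest

lemma foldZip (rest : List Int) : ∀ (prev c : Int),
    ((prev :: rest).zip rest).foldl (fun (c : Int) ab => if ab.2 - ab.1 > 5 then c + 1 else c) c
      = c + countPairs prev rest := by
  induction rest with
  | nil => intro prev c; simp [countPairs]
  | cons q rest ih =>
      intro prev c
      simp only [List.zip_cons_cons, List.foldl_cons, countPairs, ih q]
      split_ifs <;> omega

lemma get?_eq_lookup {ν : Type} (l : List (String × ν)) (k : String) :
    PySem.Dict.get? (PySem.Dict.mk l) k = l.lookup k := by
  induction l with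
  | nil => simp [PySem.Dict.get?]
  | cons kv rest ih =>
      rw [show (kv :: rest) = ((kv.1, kv.2) :: rest) by simp]
      rw [PySem.Dict.get?_mk_cons, List.lookup]
      by_cases h : k = kv.1
      · simp [h]
      · have h1 : (kv.1 == k) = false := by
          simp only [beq_eq_false_iff_ne]; exact fun e => h e.symm
        have h2 : (k == kv.1) = false := by
          simp only [beq_eq_false_iff_ne]; exact h
        simp [h1, h2, ih]

lemma positions_eq (mrna : List (String × List (List (String × Int)))) :
    ((PySem.Dict.get? (PySem.Dict.mk mrna) "u_rich_downstream").getD []).map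
      (fun u => PySem.Dict.getD (PySem.Dict.mk u) "downstream_rel_pos" 0)
      = pvURSPositions mrna := by
  unfold pvURSPositions
  rw [get?_eq_lookup]
  cases (mrna.lookup "u_rich_downstream") with
  | none => simp
  | some us =>
      simp only [Option.getD_some]
      exact List.map_congr_left (fun u _ => by
        simp [PySem.Dict.getD, get?_eq_lookup])

lemma filterMap_eq_map (us : List (List (String × Int)))
    (h : ∀ u ∈ us, (u.lookup "downstream_rel_pos").isSome = true) :
    us.filterMap (List.lookup "downstream_rel_pos")
      = us.map (fun u => (u.lookup "downstream_rel_pos").getD 0) := by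
  induction us with
  | nil => rfl
  | cons u rest ih =>
      have hu := h u (by simp)
      cases hv : u.lookup "downstream_rel_pos" with
      | none => rw [hv] at hu; simp at hu
      | some v =>
          simp only [List.filterMap_cons, List.map_cons, hv, Option.getD_some]
          exact congrArg _ (ih fun u hu => h u (by simp [hu]))

lemma sent_iff (l : List Int) : ∀ (prev : Int) (g : Bool),
    pvSentinelHit prev g l = true ↔
      ((g = true ∧ ∃ b ∈ l.head?, b ≤ 4) ∨
        ∃ t ∈ List.zip (prev :: l) (l.zip l.tail), t.1 < -6 ∧ t.2.1 = -1 ∧ t.2.2 ≤ 4) := by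
  induction l with
  | nil => intro prev g; simp [pvSentinelHit]
  | cons q rest ih =>
      intro prev g
      cases rest with
      | nil => simp [pvSentinelHit]
      | cons b r2 =>
          have hstep : pvSentinelHit prev g (q :: b :: r2)
              = ((g && decide (q ≤ 4)) ||
                  pvSentinelHit q ((q == -1) && (g || decide (q > prev + 5))) (b :: r2)) := rfl
          rw [hstep, Bool.or_eq_true, ih]
          simp only [Bool.and_eq_true, Bool.or_eq_true, decide_eq_true_eq, beq_iff_eq,
            List.head?_cons, Option.mem_def, Option.some.injEq, List.tail_cons,
            List.zip_cons_cons, List.exists_mem_cons_iff, exists_eq_left']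
          constructor
          · rintro (⟨hg, h4⟩ | ⟨⟨hq, hg | hgap⟩, hb⟩ | h)
            · exact Or.inl ⟨hg, h4⟩
            · exact Or.inl ⟨hg, by omega⟩
            · exact Or.inr (Or.inl ⟨by omega, hq, hb⟩)
            · exact Or.inr (Or.inr h)
          · rintro (⟨hg, h4⟩ | ⟨hx, hq, hb⟩ | h)
            · exact Or.inl ⟨hg, h4⟩
            · exact Or.inr (Or.inl ⟨⟨hq, Or.inr (by omega)⟩, hb⟩)
            · exact Or.inr (Or.inr h)

lemma zip_iff (ps : List Int) :
    (∃ t ∈ List.zip (-7 :: ps) (ps.zip ps.tail), t.1 < -6 ∧ t.2.1 = -1 ∧ t.2.2 ≤ 4)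
      ↔ pvHasSentinel ps = true := by
  cases ps with
  | nil => simp [pvHasSentinel]
  | cons p rest =>
      cases rest with
      | nil => simp [pvHasSentinel, pvSentinelHit]
      | cons b r2 =>
          rw [show pvHasSentinel (p :: b :: r2) = pvSentinelHit p (p == -1) (b :: r2) from rfl,
            sent_iff]
          simp only [List.tail_cons, List.zip_cons_cons, List.exists_mem_cons_iff,
            List.head?_cons, Option.mem_def, Option.some.injEq, exists_eq_left', beq_iff_eq]
          constructor
          · rintro (⟨_, hq, hb⟩ | h)
            · exact Or.inl ⟨hq, hb⟩
            · exact Or.inr h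
          · rintro (⟨hq, hb⟩ | h)
            · exact Or.inl ⟨by omega, hq, hb⟩
            · exact Or.inr h

lemma D_iff (mrna : List (String × List (List (String × Int))))
    (hpre : Pre_process_mrna mrna) :
    D_process_mrna mrna ↔ pvHasSentinel (pvURSPositions mrna) = true := by
  unfold D_process_mrna
  cases hus : mrna.lookup "u_rich_downstream" with
  | none =>
      unfold pvURSPositions
      simp [hus, pvHasSentinel]
  | some us =>
      have hps : us.filterMap (List.lookup "downstream_rel_pos") = pvURSPositions mrna := by
        unfold pvURSPositions
        rw [hus, Option.getD_some]
        refine filterMap_eq_map us ?_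
        unfold Pre_process_mrna at hpre
        rw [hus] at hpre
        simpa using hpre
      constructor
      · rintro ⟨us', hmem, hbody⟩
        rw [Option.mem_def] at hmem
        obtain rfl := Option.some_inj.mp hmem
        have h2 : ∃ t ∈ List.zip (-7 :: pvURSPositions mrna)
            ((pvURSPositions mrna).zip (pvURSPositions mrna).tail),
            t.1 < -6 ∧ t.2.1 = -1 ∧ t.2.2 ≤ 4 := by
          rw [← hps]; exact hbody
        exact (zip_iff (pvURSPositions mrna)).mp h2
      · intro h
        refine ⟨us, by rw [Option.mem_def], ?_⟩
        show ∃ t ∈ List.zip (-7 :: us.filterMap (List.lookup "downstream_rel_pos"))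
            ((us.filterMap (List.lookup "downstream_rel_pos")).zip
              (us.filterMap (List.lookup "downstream_rel_pos")).tail),
            t.1 < -6 ∧ t.2.1 = -1 ∧ t.2.2 ≤ 4
        rw [hps]
        exact (zip_iff (pvURSPositions mrna)).mpr h

lemma A_eq (mrna : List (String × List (List (String × Int)))) :
    process_mrna mrna = pvACount (pvURSPositions mrna) := by
  unfold process_mrna
  rw [← positions_eq]
  cases hg : PySem.Dict.get? (PySem.Dict.mk mrna) "u_rich_downstream" with
  | none => simp [pvACount]
  | some us =>
      simp only [Option.getD_some]
      have hfold : ∀ (s : Int × Int × Int),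
          us.foldl
            (fun (s : Int × Int × Int) u =>
              let pos := PySem.Dict.getD (PySem.Dict.mk u) "downstream_rel_pos" 0
              if s.2.1 == -1 then (s.1 + 1, pos, pos + 5)
              else if pos > s.2.2 then (s.1 + 1, pos, pos + 5)
              else (s.1, s.2.1, pos + 5))
            s
          = (us.map (fun u => PySem.Dict.getD (PySem.Dict.mk u) "downstream_rel_pos" 0)).foldl
              stepA s := by
        intro s
        rw [List.foldl_map]
        rfl
      rw [hfold]
      cases hm : us.map (fun u => PySem.Dict.getD (PySem.Dict.mk u) "downstream_rel_pos" 0) with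
      | nil => simp [pvACount]
      | cons p rest =>
          simp only [List.foldl_cons, pvACount]
          have h0 : stepA (0, -1, -1) p = (1, p, p + 5) := by simp [stepA]
          rw [h0]

lemma B_eq (mrna : List (String × List (List (String × Int)))) :
    process_mrna_alt mrna = pvBCount (pvURSPositions mrna) := by
  unfold process_mrna_alt
  rw [← positions_eq]
  cases hm : ((PySem.Dict.get? (PySem.Dict.mk mrna) "u_rich_downstream").getD []).map
      (fun u => PySem.Dict.getD (PySem.Dict.mk u) "downstream_rel_pos" 0) with
  | nil => simp [pvBCount]
  | cons p rest => simp [pvBCount, foldZip]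

lemma loop_no_hit (rest : List Int) : ∀ (prev count start : Int),
    (start = -1 → prev = -1) →
    pvSentinelHit prev (start == -1) rest = false →
    (rest.foldl stepA (count, start, prev + 5)).1 = count + countPairs prev rest := by
  induction rest with
  | nil => intro prev count start _ _; simp [countPairs]
  | cons q rest ih =>
      intro prev count start hinv hhit
      simp only [pvSentinelHit, Bool.or_eq_false_iff, Bool.and_eq_false_iff] at hhit
      obtain ⟨h1, h2⟩ := hhit
      simp only [List.foldl_cons, countPairs]
      by_cases hs : start = -1
      · have hp : prev = -1 := hinv hs
        have hq4 : ¬ q ≤ 4 := by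
          rcases h1 with h | h
          · simp [hs] at h
          · simpa using h
        have hstep : stepA (count, start, prev + 5) q = (count + 1, q, q + 5) := by
          simp [stepA, hs]
        rw [hstep, ih q (count + 1) q (fun h => h) (by simpa [hs] using h2)]
        have h5 : q - prev > 5 := by omega
        rw [if_pos h5]; omega
      · have hsb : (start == -1) = false := by simp [hs]
        by_cases hq : q > prev + 5
        · have hstep : stepA (count, start, prev + 5) q = (count + 1, q, q + 5) := by
            simp [stepA, hsb, hq]
          rw [hstep, ih q (count + 1) q (fun h => h) (by simpa [hsb, hq] using h2)]
          have h5 : q - prev > 5 := by omega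
          rw [if_pos h5]; omega
        · have hstep : stepA (count, start, prev + 5) q = (count, start, q + 5) := by
            simp [stepA, hsb, hq]
          rw [hstep, ih q count start (fun h => absurd h hs) (by simpa [hsb, hq] using h2)]
          have h5 : ¬ q - prev > 5 := by omega
          rw [if_neg h5]; omega

lemma loop_ge (rest : List Int) : ∀ (prev count start : Int),
    (rest.foldl stepA (count, start, prev + 5)).1 ≥ count + countPairs prev rest := by
  induction rest with
  | nil => intro prev count start; simp [countPairs]
  | cons q rest ih =>
      intro prev count start
      simp only [List.foldl_cons, countPairs]
      by_cases hs : start = -1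
      · have hstep : stepA (count, start, prev + 5) q = (count + 1, q, q + 5) := by
          simp [stepA, hs]
        rw [hstep]
        have := ih q (count + 1) q
        split_ifs <;> omega
      · have hsb : (start == -1) = false := by simp [hs]
        by_cases hq : q > prev + 5
        · have hstep : stepA (count, start, prev + 5) q = (count + 1, q, q + 5) := by
            simp [stepA, hsb, hq]
          rw [hstep]
          have := ih q (count + 1) q
          split_ifs <;> omega
        · have hstep : stepA (count, start, prev + 5) q = (count, start, q + 5) := by
            simp [stepA, hsb, hq]
          rw [hstep]
          have h2 := ih q count start
          have h5 : ¬ q - prev > 5 := by omega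
          rw [if_neg h5]; omega
  
lemma loop_hit (rest : List Int) : ∀ (prev count start : Int),
    (start = -1 → prev = -1) →
    pvSentinelHit prev (start == -1) rest = true →
    (rest.foldl stepA (count, start, prev + 5)).1 > count + countPairs prev rest := by
  induction rest with
  | nil => intro prev count start _ h; simp [pvSentinelHit] at h
  | cons q rest ih =>
      intro prev count start hinv hhit
      simp only [pvSentinelHit, Bool.or_eq_true, Bool.and_eq_true] at hhit
      simp only [List.foldl_cons, countPairs]
      by_cases hs : start = -1
      · have hp : prev = -1 := hinv hs
        have hstep : stepA (count, start, prev + 5) q = (count + 1, q, q + 5) := by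
          simp [stepA, hs]
        rw [hstep]
        by_cases h4 : q ≤ 4
        · have hge := loop_ge rest q (count + 1) q
          have : ¬ q - prev > 5 := by omega
          simp [this]; omega
        · have hrest : pvSentinelHit q (q == -1) rest = true := by
            rcases hhit with ⟨_, h⟩ | h
            · exact absurd (by exact of_decide_eq_true h) h4
            · simpa [hs] using h
          have := ih q (count + 1) q (fun h => h) hrest
          have hgt : q - prev > 5 := by omega
          rw [if_pos hgt]; omega
      · have hsb : (start == -1) = false := by simp [hs]
        have hrest : pvSentinelHit q ((q == -1) && decide (q > prev + 5)) rest = true := by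
          rcases hhit with ⟨h, _⟩ | h
          · rw [hsb] at h; exact absurd h (by simp)
          · rw [hsb] at h; simpa using h
        by_cases hq : q > prev + 5
        · have hstep : stepA (count, start, prev + 5) q = (count + 1, q, q + 5) := by
            simp [stepA, hsb, hq]
          rw [hstep]
          have := ih q (count + 1) q (fun h => h) (by simpa [hq] using hrest)
          have hgt : q - prev > 5 := by omega
          rw [if_pos hgt]; omega
        · have hstep : stepA (count, start, prev + 5) q = (count, start, q + 5) := by
            simp [stepA, hsb, hq]
          rw [hstep]
          have := ih q count start (fun h => absurd h hs) (by simpa [hsb, hq] using hrest)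
          have hno : ¬ q - prev > 5 := by omega
          rw [if_neg hno]; omega

-- ===== VERDICT (by name: the statement is the Claim_ definition above) =====
theorem process_mrna_spec : Claim_unchanged_process_mrna := by
  intro mrna _ hpre hD
  rw [D_iff mrna hpre, Bool.not_eq_true] at hD
  rw [A_eq, B_eq]
  cases hps : pvURSPositions mrna with
  | nil => rfl
  | cons p rest =>
      rw [hps] at hD
      simp only [pvHasSentinel] at hD
      simp only [pvACount, pvBCount]
      exact loop_no_hit rest p 1 p (fun h => h) hD

theorem process_mrna_changed : Claim_changed_process_mrna := by
  unfold Claim_changed_process_mrna; decide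

theorem process_mrna_tight : Claim_exact_process_mrna := by
  intro mrna _ hpre hD
  rw [D_iff mrna hpre] at hD
  rw [A_eq, B_eq]
  cases hps : pvURSPositions mrna with
  | nil => rw [hps] at hD; simp [pvHasSentinel] at hD
  | cons p rest =>
      rw [hps] at hD
      simp only [pvHasSentinel] at hD
      have := loop_hit rest p 1 p (fun h => h) hD
      simp only [pvACount, pvBCount]
      omega
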